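-- pv_equiv track=rewrite | github.com/ken-neumeister/BikeShareFromVSO | BikeShareMapReduce/StationPairDistance/MatchStationsToCentroids.py | prune_centroids
-- ===== SOURCE A (Python) =====
-- def prune_centroids(centroids, limit) :
--     centroids_to_remove = []
--     for centroid in centroids :
--         stations = centroid['stations']
--         if len(stations) <= limit :
--             centroids_to_remove.append(centroid)
--     current_nbr_of_centroids = len(centroids)
--     max_nbr_of_removals = min(current_nbr_of_centroids - 3,6) # retain at least 3 but remove no more than 6
--     centroids_removed = 0
--     if max_nbr_of_removals > 0 :
--         for centroid in centroids_to_remove :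
--             centroids.remove(centroid)
--             centroids_removed += 1
--             if centroids_removed >= max_nbr_of_removals :
--                 break
--     return centroids_removed # Note, other functions need refactoring, no need to pass back centroids
-- ===== SOURCE B (Python) =====
-- def prune_centroids(centroids, limit):
--     max_removals = min(len(centroids) - 3, 6)
--     kept = []
--     removed = 0
--     for centroid in centroids:
--         sparse = len(centroid['stations']) <= limit
--         if sparse and removed < max_removals:
--             removed += 1
--         else:
--             kept.append(centroid)
--     centroids[:] = kept
--     return removed
-- ===== Notes on version B (the rewrite author's own statement) =====
-- stated objective: simpler
-- what changed: Replaces A's two-pass collect-then-.remove-with-break structure (which re-scans the list for each removal) with a single pass over centroids carrying a removal budget, filtering into a kept list written back in place.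
import Mathlib
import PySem

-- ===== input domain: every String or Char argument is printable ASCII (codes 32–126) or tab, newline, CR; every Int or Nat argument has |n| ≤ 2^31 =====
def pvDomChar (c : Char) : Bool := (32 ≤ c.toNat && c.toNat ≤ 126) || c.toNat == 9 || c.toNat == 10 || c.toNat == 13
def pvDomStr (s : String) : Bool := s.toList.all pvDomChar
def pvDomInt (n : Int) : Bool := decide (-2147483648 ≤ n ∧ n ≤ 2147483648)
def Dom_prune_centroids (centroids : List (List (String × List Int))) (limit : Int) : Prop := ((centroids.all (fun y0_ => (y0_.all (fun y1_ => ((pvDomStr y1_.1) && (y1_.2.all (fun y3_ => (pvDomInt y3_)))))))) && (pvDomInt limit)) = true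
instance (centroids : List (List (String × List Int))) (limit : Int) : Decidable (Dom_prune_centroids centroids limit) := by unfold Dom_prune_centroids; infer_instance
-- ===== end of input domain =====

-- B replaces A's collect-then-`.remove`-search two-pass structure with one pass carrying a
-- removal budget (objective: simpler). Both Pythons mutate `centroids` in place identically;
-- the equivalence proved here is about the RETURN value only.

-- ===== PORT A =====
-- centroid['stations'] as first-match lookup; `.getD []` is exact under Pre_ (KeyError excluded)
def pvStations (c : List (String × List Int)) : List Int :=
  ((c.find? (fun p => p.1 == "stations")).map (·.2)).getD []

-- the second loop of A: remove, count, break when the budget is reached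
def pruneRemoveLoop : List (List (String × List Int)) → List (List (String × List Int)) → Int → Int → Int
  | _, [], removed, _ => removed
  | cs, t :: ts, removed, maxR =>
    -- `.remove` always succeeds here (t ∈ cs); getD is exact
    if removed + 1 ≥ maxR then removed + 1
    else pruneRemoveLoop ((PySem.List.remove? cs t).getD cs) ts (removed + 1) maxR

def prune_centroids (centroids : List (List (String × List Int))) (limit : Int) : Int :=
  let centroids_to_remove :=
    centroids.foldl (fun acc c => if ((pvStations c).length : Int) ≤ limit then acc ++ [c] else acc) []
  let max_nbr_of_removals : Int := min ((centroids.length : Int) - 3) 6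
  if max_nbr_of_removals > 0 then pruneRemoveLoop centroids centroids_to_remove 0 max_nbr_of_removals
  else 0

-- ===== PORT B =====
def prune_centroids_alt (centroids : List (List (String × List Int))) (limit : Int) : Int :=
  let max_removals : Int := min ((centroids.length : Int) - 3) 6
  let st := centroids.foldl
    (fun (s : List (List (String × List Int)) × Int) c =>
      let sparse := decide (((pvStations c).length : Int) ≤ limit)
      if sparse && decide (s.2 < max_removals) then (s.1, s.2 + 1) else (s.1 ++ [c], s.2))
    ([], 0)
  st.2

-- ===== PRECONDITION & SPEC =====
-- Pre_ excludes exactly the inputs where some centroid lacks the 'stations' key, on which A raises KeyError.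
def Pre_prune_centroids (centroids : List (List (String × List Int))) (limit : Int) : Prop :=
  centroids.all (fun c => ((c.find? (fun p => p.1 == "stations")).isSome : Bool)) = true
instance (centroids : List (List (String × List Int))) (limit : Int) : Decidable (Pre_prune_centroids centroids limit) := by unfold Pre_prune_centroids; infer_instance

def pvWitness_prune_centroids : (List (List (String × List Int))) × Int :=
  ([[("stations", [1])], [("stations", [])], [("stations", [1, 2])], [("stations", [])]], 0)

def Spec_prune_centroids (centroids : List (List (String × List Int))) (limit : Int) (out : Int) : Prop := out = prune_centroids_alt centroids limit
instance (centroids : List (List (String × List Int))) (limit : Int) (out : Int) : Decidable (Spec_prune_centroids centroids limit out) := by unfold Spec_prune_centroids; infer_instance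

-- ===== CLAIM (what is proved, stated in full; the proofs are below) =====
def Claim_equal_prune_centroids : Prop := ∀ (centroids : List (List (String × List Int))) (limit : Int), Dom_prune_centroids centroids limit → Pre_prune_centroids centroids limit → Spec_prune_centroids centroids limit (prune_centroids centroids limit)

-- ===== LEMMAS AND PROOFS =====

-- A's removal loop: the count depends only on the length of the to-remove list and the budget
theorem pruneRemoveLoop_eq (ts : List (List (String × List Int))) :
    ∀ (cs : List (List (String × List Int))) (removed maxR : Int), removed < maxR →
      pruneRemoveLoop cs ts removed maxR = min (removed + ts.length) maxR := by
  induction ts with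
  | nil => intro cs removed maxR h; simp [pruneRemoveLoop]; omega
  | cons t ts ih =>
    intro cs removed maxR h
    simp only [pruneRemoveLoop, List.length_cons]
    by_cases hb : removed + 1 ≥ maxR
    · rw [if_pos hb]; push_cast; omega
    · rw [if_neg hb, ih _ (removed + 1) maxR (by omega)]; push_cast; omega

-- B's fold, exhausted budget: the counter never moves
theorem foldB_sat (limit maxR : Int) (l : List (List (String × List Int))) :
    ∀ (kept : List (List (String × List Int))) (r : Int), maxR ≤ r →
      (l.foldl
        (fun (s : List (List (String × List Int)) × Int) c =>
          let sparse := decide (((pvStations c).length : Int) ≤ limit)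
          if sparse && decide (s.2 < maxR) then (s.1, s.2 + 1)
          else (s.1 ++ [c], s.2)) (kept, r)).2 = r := by
  induction l with
  | nil => intro kept r _; rfl
  | cons c l ih =>
    intro kept r h
    simp only [List.foldl_cons]
    have : (decide (((pvStations c).length : Int) ≤ limit) && decide (r < maxR)) = false := by
      simp; omega
    rw [this]
    exact ih _ r h

-- B's fold, budget available: the counter is the sparse count clipped at the budget
theorem foldB_eq (limit maxR : Int) (l : List (List (String × List Int))) :
    ∀ (kept : List (List (String × List Int))) (r : Int), r ≤ maxR →
      (l.foldl
        (fun (s : List (List (String × List Int)) × Int) c =>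
          let sparse := decide (((pvStations c).length : Int) ≤ limit)
          if sparse && decide (s.2 < maxR) then (s.1, s.2 + 1)
          else (s.1 ++ [c], s.2)) (kept, r)).2
      = min (r + (l.countP (fun c => decide (((pvStations c).length : Int) ≤ limit)) : Int)) maxR := by
  induction l with
  | nil => intro kept r h; simp; omega
  | cons c l ih =>
    intro kept r h
    simp only [List.foldl_cons, List.countP_cons]
    by_cases hc : ((pvStations c).length : Int) ≤ limit
    · by_cases hr : r < maxR
      · simp only [hc, hr, decide_true, Bool.and_self, if_true]
        rw [ih _ (r + 1) (by omega)]
        simp [hc]; push_cast; omega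
      · have hrm : r = maxR := by omega
        have hb : (decide (((pvStations c).length : Int) ≤ limit) && decide (r < maxR)) = false := by
          simp; omega
        rw [hb]; simp only [if_false, Bool.false_eq_true]
        rw [foldB_sat limit maxR l _ r (by omega)]
        simp [hc]; omega
    · have hb : (decide (((pvStations c).length : Int) ≤ limit) && decide (r < maxR)) = false := by
        simp [hc]
      rw [hb]; simp only [if_false, Bool.false_eq_true]
      rw [ih _ r h]
      simp [hc]

-- A's first loop builds exactly the sparse filter
theorem toRemove_eq (limit : Int) (l : List (List (String × List Int))) :
    l.foldl (fun acc c => if ((pvStations c).length : Int) ≤ limit then acc ++ [c] else acc) []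
      = l.filter (fun c => decide (((pvStations c).length : Int) ≤ limit)) := by
  simpa using PySem.List.foldl_append_if (fun c => decide (((pvStations c).length : Int) ≤ limit)) id l []

-- ===== VERDICT (by name: the statement is the Claim_ definition above) =====
theorem prune_centroids_spec : Claim_equal_prune_centroids := by
  intro centroids limit _ _
  unfold Spec_prune_centroids prune_centroids prune_centroids_alt
  simp only [toRemove_eq]
  set maxR : Int := min ((centroids.length : Int) - 3) 6 with hm
  by_cases h : maxR > 0
  · simp only [h, if_true]
    rw [pruneRemoveLoop_eq _ _ 0 maxR (by omega)]
    rw [foldB_eq limit maxR centroids [] 0 (by omega)]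
    rw [List.countP_eq_length_filter]
  · simp only [h, if_false]
    rw [foldB_sat limit maxR centroids [] 0 (by omega)]
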